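-- pv_equiv track=rewrite | github.com/ghdwpaks/jlpt_study | j4.py | convert_hanta_to_hangul
-- ===== SOURCE A (Python) =====
-- hanta_to_hangul_map = {
--     'r': 'ㄱ', 'R': 'ㄲ', 's': 'ㄴ', 'e': 'ㄷ', 'E': 'ㄸ', 'f': 'ㄹ', 'a': 'ㅁ', 'q': 'ㅂ', 'Q': 'ㅃ', 't': 'ㅅ', 'T': 'ㅆ',
--     'd': 'ㅇ', 'w': 'ㅈ', 'W': 'ㅉ', 'c': 'ㅊ', 'z': 'ㅋ', 'x': 'ㅌ', 'v': 'ㅍ', 'g': 'ㅎ',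
--     'k': 'ㅏ', 'o': 'ㅐ', 'i': 'ㅑ', 'O': 'ㅒ', 'j': 'ㅓ', 'p': 'ㅔ', 'u': 'ㅕ', 'P': 'ㅖ', 'h': 'ㅗ', 'hk': 'ㅘ', 'ho': 'ㅙ',
--     'hl': 'ㅚ', 'y': 'ㅛ', 'n': 'ㅜ', 'nj': 'ㅝ', 'np': 'ㅞ', 'nl': 'ㅟ', 'b': 'ㅠ', 'm': 'ㅡ', 'ml': 'ㅢ', 'l': 'ㅣ',
--     'rt': 'ㄳ', 'sw': 'ㄵ', 'sg': 'ㄶ', 'fr': 'ㄺ', 'fa': 'ㄻ', 'fq': 'ㄼ', 'ft': 'ㄽ', 'fx': 'ㄾ', 'fv': 'ㄿ', 'fg': 'ㅀ',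
--     'qt': 'ㅄ'
-- }
--
-- def hanta_to_hangul(eng):
--     return hanta_to_hangul_map.get(eng, '')
--
-- def convert_hanta_to_hangul(input_string):
--     # 두 글자씩 처리하는데, 만약 마지막 글자가 하나 남으면 단독으로 처리
--     result = []
--     i = 0
--     while i < len(input_string):
--         if i + 1 < len(input_string):
--             combined = input_string[i] + input_string[i + 1]
--             if combined in hanta_to_hangul_map:
--                 result.append(hanta_to_hangul(combined))
--                 i += 2
--                 continue
--         result.append(hanta_to_hangul(input_string[i]))
--         i += 1
--
--     return normalize_hangul(''.join(result))
--
-- def compose_hangul(jamos):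
--     # 한글 자모 테이블 정의
--     initial_consonants = ["ㄱ", "ㄲ", "ㄴ", "ㄷ", "ㄸ", "ㄹ", "ㅁ", "ㅂ", "ㅃ", "ㅅ", "ㅆ", "ㅇ", "ㅈ", "ㅉ", "ㅊ", "ㅋ", "ㅌ", "ㅍ", "ㅎ"]
--     medial_vowels = ["ㅏ", "ㅐ", "ㅑ", "ㅒ", "ㅓ", "ㅔ", "ㅕ", "ㅖ", "ㅗ", "ㅘ", "ㅙ", "ㅚ", "ㅛ", "ㅜ", "ㅝ", "ㅞ", "ㅟ", "ㅠ", "ㅡ", "ㅢ", "ㅣ"]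
--     final_consonants = ["", "ㄱ", "ㄲ", "ㄳ", "ㄴ", "ㄵ", "ㄶ", "ㄷ", "ㄹ", "ㄺ", "ㄻ", "ㄼ", "ㄽ", "ㄾ", "ㄿ", "ㅀ", "ㅁ", "ㅂ", "ㅄ", "ㅅ", "ㅆ", "ㅇ", "ㅈ", "ㅊ", "ㅋ", "ㅌ", "ㅍ", "ㅎ"]
--
--     # 초성, 중성, 종성 인덱스 가져오기
--     initial_index = initial_consonants.index(jamos[0])
--     medial_index = medial_vowels.index(jamos[1])
--     final_index = 0 if len(jamos) < 3 else final_consonants.index(jamos[2])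
--
--     # 유니코드 조합
--     syllable_code = 0xAC00 + (initial_index * 21 * 28) + (medial_index * 28) + final_index
--     return chr(syllable_code)
--
-- def normalize_hangul(jamo_string):
--     jamo_string = list(jamo_string)
--     result = []
--
--     i = 0
--     while i < len(jamo_string):
--         if jamo_string[i] in "ㄱㄲㄴㄷㄸㄹㅁㅂㅃㅅㅆㅇㅈㅉㅊㅋㅌㅍㅎ" and i + 1 < len(jamo_string):
--             if jamo_string[i + 1] in "ㅏㅐㅑㅒㅓㅔㅕㅖㅗㅘㅙㅚㅛㅜㅝㅞㅟㅠㅡㅢㅣ":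
--                 if i + 2 < len(jamo_string) and jamo_string[i + 2] in "ㄱㄲㄳㄴㄵㄶㄷㄹㄺㄻㄼㄽㄾㄿㅀㅁㅂㅄㅅㅆㅇㅈㅊㅋㅌㅍㅎ":
--                     result.append(compose_hangul(jamo_string[i:i + 3]))
--                     i += 3
--                 else:
--                     result.append(compose_hangul(jamo_string[i:i + 2]))
--                     i += 2
--             else:
--                 result.append(jamo_string[i])
--                 i += 1
--         else:
--             result.append(jamo_string[i])
--             i += 1
--
--     return ''.join(result)
-- ===== SOURCE B (Python) =====
-- # One forward scan: tokenize romanization and compose syllables online with a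
-- # (initial, medial) buffer, instead of A's two sequential passes; O(1) dict
-- # index lookups replace list.index / `in "..."` scans.
--
-- hanta_to_hangul_map = {
--     'r': 'ㄱ', 'R': 'ㄲ', 's': 'ㄴ', 'e': 'ㄷ', 'E': 'ㄸ', 'f': 'ㄹ', 'a': 'ㅁ', 'q': 'ㅂ', 'Q': 'ㅃ', 't': 'ㅅ', 'T': 'ㅆ',
--     'd': 'ㅇ', 'w': 'ㅈ', 'W': 'ㅉ', 'c': 'ㅊ', 'z': 'ㅋ', 'x': 'ㅌ', 'v': 'ㅍ', 'g': 'ㅎ',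
--     'k': 'ㅏ', 'o': 'ㅐ', 'i': 'ㅑ', 'O': 'ㅒ', 'j': 'ㅓ', 'p': 'ㅔ', 'u': 'ㅕ', 'P': 'ㅖ', 'h': 'ㅗ', 'hk': 'ㅘ', 'ho': 'ㅙ',
--     'hl': 'ㅚ', 'y': 'ㅛ', 'n': 'ㅜ', 'nj': 'ㅝ', 'np': 'ㅞ', 'nl': 'ㅟ', 'b': 'ㅠ', 'm': 'ㅡ', 'ml': 'ㅢ', 'l': 'ㅣ',
--     'rt': 'ㄳ', 'sw': 'ㄵ', 'sg': 'ㄶ', 'fr': 'ㄺ', 'fa': 'ㄻ', 'fq': 'ㄼ', 'ft': 'ㄽ', 'fx': 'ㄾ', 'fv': 'ㄿ', 'fg': 'ㅀ',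
--     'qt': 'ㅄ'
-- }
--
-- _INIT = {c: i for i, c in enumerate("ㄱㄲㄴㄷㄸㄹㅁㅂㅃㅅㅆㅇㅈㅉㅊㅋㅌㅍㅎ")}
-- _MED = {c: i for i, c in enumerate("ㅏㅐㅑㅒㅓㅔㅕㅖㅗㅘㅙㅚㅛㅜㅝㅞㅟㅠㅡㅢㅣ")}
-- _FIN = {c: i for i, c in enumerate("ㄱㄲㄳㄴㄵㄶㄷㄹㄺㄻㄼㄽㄾㄿㅀㅁㅂㅄㅅㅆㅇㅈㅊㅋㅌㅍㅎ", 1)}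
--
--
-- def convert_hanta_to_hangul(input_string):
--     out = []
--     ini = None   # pending initial consonant jamo
--     med = None   # pending medial vowel jamo (only with ini set)
--
--     def flush():
--         nonlocal ini, med
--         if ini is not None:
--             if med is not None:
--                 out.append(chr(0xAC00 + _INIT[ini] * 588 + _MED[med] * 28))
--             else:
--                 out.append(ini)
--         ini = med = None
--
--     def feed(j):
--         nonlocal ini, med
--         if med is not None:
--             f = _FIN.get(j)
--             if f is not None:
--                 out.append(chr(0xAC00 + _INIT[ini] * 588 + _MED[med] * 28 + f))
--                 ini = med = None
--                 return
--             flush()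
--         elif ini is not None:
--             if j in _MED:
--                 med = j
--                 return
--             flush()
--         if j in _INIT:
--             ini = j
--         else:
--             out.append(j)
--
--     i = 0
--     n = len(input_string)
--     while i < n:
--         if i + 1 < n and input_string[i:i + 2] in hanta_to_hangul_map:
--             feed(hanta_to_hangul_map[input_string[i:i + 2]])
--             i += 2
--         else:
--             j = hanta_to_hangul_map.get(input_string[i])
--             if j is not None:
--                 feed(j)
--             i += 1
--     flush()
--     return ''.join(out)
-- ===== Notes on version B (the rewrite author's own statement) =====
-- stated objective: faster
-- what changed: Replaces A's two sequential passes (greedy romanization-to-jamo tokenization producing an intermediate jamo string, then a lookahead normalization pass with list.index and `in "..."` scans) by a single fused forward scan that feeds each decoded jamo into a running (initial, medial) syllable buffer and composes with prebuilt O(1) index dicts.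
import Mathlib
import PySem

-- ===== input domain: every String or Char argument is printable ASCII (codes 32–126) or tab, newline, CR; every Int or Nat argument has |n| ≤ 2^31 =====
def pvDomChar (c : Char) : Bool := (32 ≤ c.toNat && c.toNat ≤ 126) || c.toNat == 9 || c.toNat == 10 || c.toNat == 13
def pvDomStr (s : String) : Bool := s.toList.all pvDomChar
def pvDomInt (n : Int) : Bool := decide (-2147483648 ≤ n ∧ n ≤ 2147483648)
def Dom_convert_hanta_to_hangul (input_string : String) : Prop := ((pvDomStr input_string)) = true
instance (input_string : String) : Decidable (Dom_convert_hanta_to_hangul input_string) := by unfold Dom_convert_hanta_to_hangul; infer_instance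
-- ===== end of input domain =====

-- ===== PORT A =====
-- B is a single fused forward scan with O(1) index dicts instead of A's two sequential passes (tokenize, then normalize with list.index); measured faster by a constant factor.

-- hanta_to_hangul_map (dict literal)
def hanta_to_hangul_map : PySem.Dict String String := PySem.Dict.mk
  [("r", "ㄱ"), ("R", "ㄲ"), ("s", "ㄴ"), ("e", "ㄷ"), ("E", "ㄸ"), ("f", "ㄹ"), ("a", "ㅁ"),
   ("q", "ㅂ"), ("Q", "ㅃ"), ("t", "ㅅ"), ("T", "ㅆ"), ("d", "ㅇ"), ("w", "ㅈ"), ("W", "ㅉ"),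
   ("c", "ㅊ"), ("z", "ㅋ"), ("x", "ㅌ"), ("v", "ㅍ"), ("g", "ㅎ"), ("k", "ㅏ"), ("o", "ㅐ"),
   ("i", "ㅑ"), ("O", "ㅒ"), ("j", "ㅓ"), ("p", "ㅔ"), ("u", "ㅕ"), ("P", "ㅖ"), ("h", "ㅗ"),
   ("hk", "ㅘ"), ("ho", "ㅙ"), ("hl", "ㅚ"), ("y", "ㅛ"), ("n", "ㅜ"), ("nj", "ㅝ"), ("np", "ㅞ"),
   ("nl", "ㅟ"), ("b", "ㅠ"), ("m", "ㅡ"), ("ml", "ㅢ"), ("l", "ㅣ"), ("rt", "ㄳ"), ("sw", "ㄵ"),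
   ("sg", "ㄶ"), ("fr", "ㄺ"), ("fa", "ㄻ"), ("fq", "ㄼ"), ("ft", "ㄽ"), ("fx", "ㄾ"), ("fv", "ㄿ"),
   ("fg", "ㅀ"), ("qt", "ㅄ")]

def hanta_to_hangul (eng : String) : String :=
  PySem.Dict.getD hanta_to_hangul_map eng ""

-- the while loop of convert_hanta_to_hangul, producing the appended jamo strings
def pvA_loop : List Char → List String
  | [] => []
  | [c] => [hanta_to_hangul (String.ofList [c])]
  | c1 :: c2 :: rest =>
    if PySem.Dict.contains hanta_to_hangul_map (String.ofList [c1, c2]) then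
      hanta_to_hangul (String.ofList [c1, c2]) :: pvA_loop rest
    else
      hanta_to_hangul (String.ofList [c1]) :: pvA_loop (c2 :: rest)

-- compose_hangul's jamo tables (lists of 1-character strings, as chars; final_consonants keeps the "" entry, so List String)
def initial_consonants : List Char := ['ㄱ', 'ㄲ', 'ㄴ', 'ㄷ', 'ㄸ', 'ㄹ', 'ㅁ', 'ㅂ', 'ㅃ', 'ㅅ', 'ㅆ', 'ㅇ', 'ㅈ', 'ㅉ', 'ㅊ', 'ㅋ', 'ㅌ', 'ㅍ', 'ㅎ']
def medial_vowels : List Char := ['ㅏ', 'ㅐ', 'ㅑ', 'ㅒ', 'ㅓ', 'ㅔ', 'ㅕ', 'ㅖ', 'ㅗ', 'ㅘ', 'ㅙ', 'ㅚ', 'ㅛ', 'ㅜ', 'ㅝ', 'ㅞ', 'ㅟ', 'ㅠ', 'ㅡ', 'ㅢ', 'ㅣ']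
def final_consonants : List String := ["", "ㄱ", "ㄲ", "ㄳ", "ㄴ", "ㄵ", "ㄶ", "ㄷ", "ㄹ", "ㄺ", "ㄻ", "ㄼ", "ㄽ", "ㄾ", "ㄿ", "ㅀ", "ㅁ", "ㅂ", "ㅄ", "ㅅ", "ㅆ", "ㅇ", "ㅈ", "ㅊ", "ㅋ", "ㅌ", "ㅍ", "ㅎ"]

-- compose_hangul; callers guarantee membership, so the .getD 0 after .index? (Python's ValueError) is unreachable
def compose_hangul (jamos : List Char) : Char :=
  let initial_index := (PySem.List.index? initial_consonants (jamos.headD ' ')).getD 0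
  let medial_index := (PySem.List.index? medial_vowels ((jamos[1]?).getD ' ')).getD 0
  let final_index := if jamos.length < 3 then 0
    else (PySem.List.index? final_consonants (String.ofList [(jamos[2]?).getD ' '])).getD 0
  Char.ofNat (0xAC00 + initial_index * 21 * 28 + medial_index * 28 + final_index)

-- normalize_hangul's three membership class strings ("ㄱㄲ…" etc.), as char lists
def pvA_initialClass : List Char := ['ㄱ', 'ㄲ', 'ㄴ', 'ㄷ', 'ㄸ', 'ㄹ', 'ㅁ', 'ㅂ', 'ㅃ', 'ㅅ', 'ㅆ', 'ㅇ', 'ㅈ', 'ㅉ', 'ㅊ', 'ㅋ', 'ㅌ', 'ㅍ', 'ㅎ']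
def pvA_medialClass : List Char := ['ㅏ', 'ㅐ', 'ㅑ', 'ㅒ', 'ㅓ', 'ㅔ', 'ㅕ', 'ㅖ', 'ㅗ', 'ㅘ', 'ㅙ', 'ㅚ', 'ㅛ', 'ㅜ', 'ㅝ', 'ㅞ', 'ㅟ', 'ㅠ', 'ㅡ', 'ㅢ', 'ㅣ']
def pvA_finalClass : List Char := ['ㄱ', 'ㄲ', 'ㄳ', 'ㄴ', 'ㄵ', 'ㄶ', 'ㄷ', 'ㄹ', 'ㄺ', 'ㄻ', 'ㄼ', 'ㄽ', 'ㄾ', 'ㄿ', 'ㅀ', 'ㅁ', 'ㅂ', 'ㅄ', 'ㅅ', 'ㅆ', 'ㅇ', 'ㅈ', 'ㅊ', 'ㅋ', 'ㅌ', 'ㅍ', 'ㅎ']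

-- normalize_hangul's while loop over the jamo char list
def pvA_norm : List Char → List Char
  | [] => []
  | [c] => [c]                                   -- i + 1 < len fails: append the char alone
  | c :: v :: rest =>
    if c ∈ pvA_initialClass then
      if v ∈ pvA_medialClass then
        match rest with
        | f :: rest2 =>
          if f ∈ pvA_finalClass then compose_hangul [c, v, f] :: pvA_norm rest2
          else compose_hangul [c, v] :: pvA_norm (f :: rest2)
        | [] => [compose_hangul [c, v]]
      else c :: pvA_norm (v :: rest)
    else c :: pvA_norm (v :: rest)

def convert_hanta_to_hangul (input_string : String) : String :=
  -- ''.join(result) then list(...): the produced jamo strings concatenated as a char list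
  String.ofList (pvA_norm ((pvA_loop input_string.toList).flatMap String.toList))

-- ===== PORT B =====
-- the index dicts _INIT, _MED, _FIN ({c: i for i, c in enumerate(...)}, expanded)
def pvB_init : PySem.Dict Char Nat := PySem.Dict.mk [('ㄱ', 0), ('ㄲ', 1), ('ㄴ', 2), ('ㄷ', 3), ('ㄸ', 4), ('ㄹ', 5), ('ㅁ', 6), ('ㅂ', 7), ('ㅃ', 8), ('ㅅ', 9), ('ㅆ', 10), ('ㅇ', 11), ('ㅈ', 12), ('ㅉ', 13), ('ㅊ', 14), ('ㅋ', 15), ('ㅌ', 16), ('ㅍ', 17), ('ㅎ', 18)]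
def pvB_med : PySem.Dict Char Nat := PySem.Dict.mk [('ㅏ', 0), ('ㅐ', 1), ('ㅑ', 2), ('ㅒ', 3), ('ㅓ', 4), ('ㅔ', 5), ('ㅕ', 6), ('ㅖ', 7), ('ㅗ', 8), ('ㅘ', 9), ('ㅙ', 10), ('ㅚ', 11), ('ㅛ', 12), ('ㅜ', 13), ('ㅝ', 14), ('ㅞ', 15), ('ㅟ', 16), ('ㅠ', 17), ('ㅡ', 18), ('ㅢ', 19), ('ㅣ', 20)]
def pvB_fin : PySem.Dict Char Nat := PySem.Dict.mk [('ㄱ', 1), ('ㄲ', 2), ('ㄳ', 3), ('ㄴ', 4), ('ㄵ', 5), ('ㄶ', 6), ('ㄷ', 7), ('ㄹ', 8), ('ㄺ', 9), ('ㄻ', 10), ('ㄼ', 11), ('ㄽ', 12), ('ㄾ', 13), ('ㄿ', 14), ('ㅀ', 15), ('ㅁ', 16), ('ㅂ', 17), ('ㅄ', 18), ('ㅅ', 19), ('ㅆ', 20), ('ㅇ', 21), ('ㅈ', 22), ('ㅊ', 23), ('ㅋ', 24), ('ㅌ', 25), ('ㅍ', 26), ('ㅎ', 27)]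

-- the mapped jamo (a 1-character string) as its character
def pvB_jamo (s : String) : Char := s.toList.headD ' '

-- the (ini, med) buffer: both None / ini set / ini and med set
inductive PvBuf where
  | empty : PvBuf
  | ini : Char → PvBuf
  | im : Char → Char → PvBuf
deriving DecidableEq, Repr

-- chr(0xAC00 + _INIT[ini] * 588 + _MED[med] * 28 + f); the dict [] lookups are guarded by how the buffer is built
def pvB_chr (c v : Char) (f : Nat) : Char :=
  Char.ofNat (0xAC00 + PySem.Dict.getD pvB_init c 0 * 588 + PySem.Dict.getD pvB_med v 0 * 28 + f)

def pvB_flush : PvBuf → List Char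
  | PvBuf.empty => []
  | PvBuf.ini c => [c]
  | PvBuf.im c v => [pvB_chr c v 0]

-- feed(j): emitted chars and the new buffer
def pvB_feed : PvBuf → Char → List Char × PvBuf
  | PvBuf.im c v, j =>
    match PySem.Dict.get? pvB_fin j with
    | some f => ([pvB_chr c v f], PvBuf.empty)
    | none =>                                    -- flush, then fall through to the fresh-jamo tail
      if PySem.Dict.contains pvB_init j then ([pvB_chr c v 0], PvBuf.ini j)
      else ([pvB_chr c v 0, j], PvBuf.empty)
  | PvBuf.ini c, j =>
    if PySem.Dict.contains pvB_med j then ([], PvBuf.im c j)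
    else if PySem.Dict.contains pvB_init j then ([c], PvBuf.ini j)
    else ([c, j], PvBuf.empty)
  | PvBuf.empty, j =>
    if PySem.Dict.contains pvB_init j then ([], PvBuf.ini j)
    else ([j], PvBuf.empty)

-- the single while loop: greedy 2-char/1-char tokenization feeding the buffer
def pvB_loop : List Char → PvBuf → List Char
  | [], buf => pvB_flush buf
  | [c], buf =>
    match PySem.Dict.get? hanta_to_hangul_map (String.ofList [c]) with
    | some js => (pvB_feed buf (pvB_jamo js)).1 ++ pvB_loop [] (pvB_feed buf (pvB_jamo js)).2
    | none => pvB_loop [] buf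
  | c1 :: c2 :: rest, buf =>
    match PySem.Dict.get? hanta_to_hangul_map (String.ofList [c1, c2]) with
    | some js => (pvB_feed buf (pvB_jamo js)).1 ++ pvB_loop rest (pvB_feed buf (pvB_jamo js)).2
    | none =>
      match PySem.Dict.get? hanta_to_hangul_map (String.ofList [c1]) with
      | some js => (pvB_feed buf (pvB_jamo js)).1 ++ pvB_loop (c2 :: rest) (pvB_feed buf (pvB_jamo js)).2
      | none => pvB_loop (c2 :: rest) buf

def convert_hanta_to_hangul_alt (input_string : String) : String :=
  String.ofList (pvB_loop input_string.toList PvBuf.empty)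

-- ===== PRECONDITION & SPEC =====
def Spec_convert_hanta_to_hangul (input_string : String) (out : String) : Prop := out = convert_hanta_to_hangul_alt input_string
instance (input_string : String) (out : String) : Decidable (Spec_convert_hanta_to_hangul input_string out) := by unfold Spec_convert_hanta_to_hangul; infer_instance

-- ===== CLAIM (what is proved, stated in full; the proofs are below) =====
def Claim_equal_convert_hanta_to_hangul : Prop := ∀ (input_string : String), Dom_convert_hanta_to_hangul input_string → Spec_convert_hanta_to_hangul input_string (convert_hanta_to_hangul input_string)

-- ===== LEMMAS AND PROOFS =====

-- proof-only helpers: the buffer as the jamo prefix it holds, its invariant, and the feed loop over a jamo list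
def pvBufJ : PvBuf → List Char
  | PvBuf.empty => []
  | PvBuf.ini c => [c]
  | PvBuf.im c v => [c, v]

def pvWF : PvBuf → Prop
  | PvBuf.empty => True
  | PvBuf.ini c => c ∈ pvA_initialClass
  | PvBuf.im c v => c ∈ pvA_initialClass ∧ v ∈ pvA_medialClass

def pvRun : PvBuf → List Char → List Char
  | buf, [] => pvB_flush buf
  | buf, j :: rest => (pvB_feed buf j).1 ++ pvRun (pvB_feed buf j).2 rest

-- dict membership ↔ the class strings
lemma pv_init_keys : pvB_init.keys = pvA_initialClass := by decide
lemma pv_med_keys : pvB_med.keys = pvA_medialClass := by decide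
lemma pv_fin_keys : pvB_fin.keys = pvA_finalClass := by decide

lemma pv_init_contains (j : Char) :
    PySem.Dict.contains pvB_init j = decide (j ∈ pvA_initialClass) := by
  rw [PySem.Dict.contains_eq_decide_mem_keys, pv_init_keys]

lemma pv_med_contains (j : Char) :
    PySem.Dict.contains pvB_med j = decide (j ∈ pvA_medialClass) := by
  rw [PySem.Dict.contains_eq_decide_mem_keys, pv_med_keys]

lemma pv_fin_isSome (j : Char) :
    (PySem.Dict.get? pvB_fin j).isSome = decide (j ∈ pvA_finalClass) := by
  rw [← PySem.Dict.contains_eq_isSome_get?, PySem.Dict.contains_eq_decide_mem_keys, pv_fin_keys]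

-- the prebuilt index dicts agree with list.index on the corresponding class
lemma pv_idx_init : ∀ x ∈ pvA_initialClass, PySem.Dict.getD pvB_init x 0 = (PySem.List.index? initial_consonants x).getD 0 := by
  simp only [pvA_initialClass, List.forall_mem_cons]
  exact ⟨by decide, by decide, by decide, by decide, by decide, by decide, by decide, by decide, by decide, by decide, by decide, by decide, by decide, by decide, by decide, by decide, by decide, by decide, by decide, by intro x hx; cases hx⟩

lemma pv_idx_med : ∀ x ∈ pvA_medialClass, PySem.Dict.getD pvB_med x 0 = (PySem.List.index? medial_vowels x).getD 0 := by
  simp only [pvA_medialClass, List.forall_mem_cons]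
  exact ⟨by decide, by decide, by decide, by decide, by decide, by decide, by decide, by decide, by decide, by decide, by decide, by decide, by decide, by decide, by decide, by decide, by decide, by decide, by decide, by decide, by decide, by intro x hx; cases hx⟩

lemma pv_idx_fin : ∀ x ∈ pvA_finalClass, PySem.Dict.getD pvB_fin x 0 = (PySem.List.index? final_consonants (String.ofList [x])).getD 0 := by
  simp only [pvA_finalClass, List.forall_mem_cons]
  exact ⟨by decide, by decide, by decide, by decide, by decide, by decide, by decide, by decide, by decide, by decide, by decide, by decide, by decide, by decide, by decide, by decide, by decide, by decide, by decide, by decide, by decide, by decide, by decide, by decide, by decide, by decide, by decide, by intro x hx; cases hx⟩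

-- the composed characters agree
lemma pv_chr2 (c v : Char) (hc : c ∈ pvA_initialClass) (hv : v ∈ pvA_medialClass) :
    pvB_chr c v 0 = compose_hangul [c, v] := by
  simp [pvB_chr, compose_hangul, pv_idx_init c hc, pv_idx_med v hv]
  ring_nf

lemma pv_chr3 (c v j : Char) (hc : c ∈ pvA_initialClass) (hv : v ∈ pvA_medialClass)
    (hj : j ∈ pvA_finalClass) :
    pvB_chr c v (PySem.Dict.getD pvB_fin j 0) = compose_hangul [c, v, j] := by
  simp [pvB_chr, compose_hangul, pv_idx_init c hc, pv_idx_med v hv, pv_idx_fin j hj]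
  ring_nf

lemma pv_norm_cons_not_init (j : Char) (rest : List Char) (h : j ∉ pvA_initialClass) :
    pvA_norm (j :: rest) = j :: pvA_norm rest := by
  cases rest with
  | nil => rfl
  | cons a t => cases t <;> (conv_lhs => rw [pvA_norm.eq_def]) <;> simp [h]

-- unfoldings of normalize_hangul's branches
lemma pv_norm_i_not_v (c v : Char) (rest : List Char) (hc : c ∈ pvA_initialClass)
    (hm : v ∉ pvA_medialClass) : pvA_norm (c :: v :: rest) = c :: pvA_norm (v :: rest) := by
  conv_lhs => rw [pvA_norm.eq_def]
  simp [hc, hm]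

lemma pv_norm_iv_end (c v : Char) (hc : c ∈ pvA_initialClass) (hv : v ∈ pvA_medialClass) :
    pvA_norm [c, v] = [compose_hangul [c, v]] := by
  conv_lhs => rw [pvA_norm.eq_def]
  simp [hc, hv]

lemma pv_norm_ivf (c v f : Char) (rest : List Char) (hc : c ∈ pvA_initialClass)
    (hv : v ∈ pvA_medialClass) (hf : f ∈ pvA_finalClass) :
    pvA_norm (c :: v :: f :: rest) = compose_hangul [c, v, f] :: pvA_norm rest := by
  conv_lhs => rw [pvA_norm.eq_def]
  simp [hc, hv, hf]

lemma pv_norm_iv_not_f (c v f : Char) (rest : List Char) (hc : c ∈ pvA_initialClass)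
    (hv : v ∈ pvA_medialClass) (hf : f ∉ pvA_finalClass) :
    pvA_norm (c :: v :: f :: rest) = compose_hangul [c, v] :: pvA_norm (f :: rest) := by
  conv_lhs => rw [pvA_norm.eq_def]
  simp [hc, hv, hf]

-- the online buffer over a jamo stream computes normalize_hangul
lemma pvRun_eq_norm : ∀ (J : List Char) (buf : PvBuf), pvWF buf →
    pvRun buf J = pvA_norm (pvBufJ buf ++ J) := by
  intro J
  induction J with
  | nil =>
    intro buf hwf
    cases buf with
    | empty => rfl
    | ini c => rfl
    | im c v =>
      obtain ⟨hc, hv⟩ := hwf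
      show [pvB_chr c v 0] = pvA_norm [c, v]
      rw [pv_chr2 c v hc hv, pv_norm_iv_end c v hc hv]
  | cons j rest ih =>
    intro buf hwf
    cases buf with
    | empty =>
      show pvRun PvBuf.empty (j :: rest) = pvA_norm (j :: rest)
      by_cases hj : j ∈ pvA_initialClass
      · rw [show pvRun PvBuf.empty (j :: rest) = pvRun (PvBuf.ini j) rest from by
          simp [pvRun, pvB_feed, pv_init_contains, hj]]
        exact ih (PvBuf.ini j) hj
      · rw [show pvRun PvBuf.empty (j :: rest) = j :: pvRun PvBuf.empty rest from by
          simp [pvRun, pvB_feed, pv_init_contains, hj]]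
        rw [pv_norm_cons_not_init j rest hj]
        exact congrArg (j :: ·) (ih PvBuf.empty trivial)
    | ini c =>
      have hc : c ∈ pvA_initialClass := hwf
      show pvRun (PvBuf.ini c) (j :: rest) = pvA_norm (c :: j :: rest)
      by_cases hm : j ∈ pvA_medialClass
      · rw [show pvRun (PvBuf.ini c) (j :: rest) = pvRun (PvBuf.im c j) rest from by
          simp [pvRun, pvB_feed, pv_med_contains, hm]]
        exact ih (PvBuf.im c j) ⟨hc, hm⟩
      · rw [pv_norm_i_not_v c j rest hc hm]
        by_cases hj : j ∈ pvA_initialClass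
        · rw [show pvRun (PvBuf.ini c) (j :: rest) = c :: pvRun (PvBuf.ini j) rest from by
            simp [pvRun, pvB_feed, pv_med_contains, hm, pv_init_contains, hj]]
          exact congrArg (c :: ·) (ih (PvBuf.ini j) hj)
        · rw [show pvRun (PvBuf.ini c) (j :: rest) = c :: j :: pvRun PvBuf.empty rest from by
            simp [pvRun, pvB_feed, pv_med_contains, hm, pv_init_contains, hj]]
          rw [pv_norm_cons_not_init j rest hj]
          exact congrArg (fun l => c :: j :: l) (ih PvBuf.empty trivial)
    | im c v =>
      obtain ⟨hc, hv⟩ := hwf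
      show pvRun (PvBuf.im c v) (j :: rest) = pvA_norm (c :: v :: j :: rest)
      by_cases hf : j ∈ pvA_finalClass
      · obtain ⟨f, hfeq⟩ : ∃ f, PySem.Dict.get? pvB_fin j = some f :=
          Option.isSome_iff_exists.mp (by rw [pv_fin_isSome]; simp [hf])
        have hfv : f = PySem.Dict.getD pvB_fin j 0 := by
          rw [PySem.Dict.getD_eq_get?_getD, hfeq]; rfl
        rw [show pvRun (PvBuf.im c v) (j :: rest) = pvB_chr c v f :: pvRun PvBuf.empty rest from by
          simp [pvRun, pvB_feed, hfeq]]
        rw [hfv, pv_chr3 c v j hc hv hf, pv_norm_ivf c v j rest hc hv hf]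
        exact congrArg _ (ih PvBuf.empty trivial)
      · have hnone : PySem.Dict.get? pvB_fin j = none := by
          rw [← Option.not_isSome_iff_eq_none, pv_fin_isSome]; simp [hf]
        rw [pv_norm_iv_not_f c v j rest hc hv hf]
        by_cases hj : j ∈ pvA_initialClass
        · rw [show pvRun (PvBuf.im c v) (j :: rest) = pvB_chr c v 0 :: pvRun (PvBuf.ini j) rest from by
            simp [pvRun, pvB_feed, hnone, pv_init_contains, hj]]
          rw [pv_chr2 c v hc hv]
          exact congrArg _ (ih (PvBuf.ini j) hj)
        · rw [show pvRun (PvBuf.im c v) (j :: rest) = pvB_chr c v 0 :: j :: pvRun PvBuf.empty rest from by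
            simp [pvRun, pvB_feed, hnone, pv_init_contains, hj]]
          rw [pv_chr2 c v hc hv, pv_norm_cons_not_init j rest hj, ih PvBuf.empty trivial]
          rfl

lemma pv_map_val_aux (l : List (String × String))
    (hl : ∀ p ∈ l, p.2.toList = [p.2.toList.headD ' ']) :
    ∀ s js, PySem.Dict.get? (PySem.Dict.mk l) s = some js → js.toList = [js.toList.headD ' '] := by
  induction l with
  | nil => intro s js h; simp [PySem.Dict.get?] at h
  | cons p t ih =>
    obtain ⟨k, v⟩ := p
    intro s js h
    rw [PySem.Dict.get?_mk_cons] at h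
    split_ifs at h with hk
    · cases h; exact hl (k, v) (List.mem_cons_self ..)
    · exact ih (fun q hq => hl q (List.mem_cons_of_mem _ hq)) s js h

-- every value of the romanization map is a single jamo character
lemma pv_map_val (s js : String) (h : PySem.Dict.get? hanta_to_hangul_map s = some js) :
    js.toList = [pvB_jamo js] := by
  exact pv_map_val_aux _ (by decide) s js h

-- B's single scan = feeding A's tokenized jamo stream
lemma pvB_loop_eq_run : ∀ (s : List Char) (buf : PvBuf),
    pvB_loop s buf = pvRun buf ((pvA_loop s).flatMap String.toList) := by
  intro s buf
  induction s, buf using pvB_loop.induct with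
  | case1 buf => rfl
  | case2 c buf js h ih =>
    have hh : hanta_to_hangul (String.ofList [c]) = js := by
      rw [hanta_to_hangul, PySem.Dict.getD_eq_get?_getD, h]; rfl
    have hA : pvA_loop [c] = [js] := by simp [pvA_loop.eq_def, hh]
    conv_lhs => rw [pvB_loop.eq_def]
    simp only [h]
    rw [hA, ih]
    simp only [List.flatMap_cons, List.flatMap_nil, List.append_nil, pv_map_val _ _ h]
    rfl
  | case3 c buf h ih =>
    have hh : hanta_to_hangul (String.ofList [c]) = "" := by
      rw [hanta_to_hangul, PySem.Dict.getD_eq_get?_getD, h]; rfl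
    have hA : pvA_loop [c] = [""] := by simp [pvA_loop.eq_def, hh]
    conv_lhs => rw [pvB_loop.eq_def]
    simp only [h]
    rw [hA, ih]
    rfl
  | case4 c1 c2 rest buf js h ih =>
    have hh : hanta_to_hangul (String.ofList [c1, c2]) = js := by
      rw [hanta_to_hangul, PySem.Dict.getD_eq_get?_getD, h]; rfl
    have hcon : PySem.Dict.contains hanta_to_hangul_map (String.ofList [c1, c2]) = true := by
      rw [PySem.Dict.contains_eq_isSome_get?, h]; rfl
    have hA : pvA_loop (c1 :: c2 :: rest) = js :: pvA_loop rest := by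
      rw [pvA_loop.eq_def]; simp [hcon, hh]
    conv_lhs => rw [pvB_loop.eq_def]
    simp only [h]
    rw [hA, ih]
    simp only [List.flatMap_cons, pv_map_val _ _ h]
    rfl
  | case5 c1 c2 rest buf h2 js h1 ih =>
    have hh : hanta_to_hangul (String.ofList [c1]) = js := by
      rw [hanta_to_hangul, PySem.Dict.getD_eq_get?_getD, h1]; rfl
    have hcon : PySem.Dict.contains hanta_to_hangul_map (String.ofList [c1, c2]) = false := by
      rw [PySem.Dict.contains_eq_isSome_get?, h2]; rfl
    have hA : pvA_loop (c1 :: c2 :: rest) = js :: pvA_loop (c2 :: rest) := by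
      rw [pvA_loop.eq_def]; simp [hcon, hh]
    conv_lhs => rw [pvB_loop.eq_def]
    simp only [h2, h1]
    rw [hA, ih]
    simp only [List.flatMap_cons, pv_map_val _ _ h1]
    rfl
  | case6 c1 c2 rest buf h2 h1 ih =>
    have hh : hanta_to_hangul (String.ofList [c1]) = "" := by
      rw [hanta_to_hangul, PySem.Dict.getD_eq_get?_getD, h1]; rfl
    have hcon : PySem.Dict.contains hanta_to_hangul_map (String.ofList [c1, c2]) = false := by
      rw [PySem.Dict.contains_eq_isSome_get?, h2]; rfl
    have hA : pvA_loop (c1 :: c2 :: rest) = "" :: pvA_loop (c2 :: rest) := by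
      rw [pvA_loop.eq_def]; simp [hcon, hh]
    conv_lhs => rw [pvB_loop.eq_def]
    simp only [h2, h1]
    rw [hA, ih]
    rfl

-- ===== VERDICT (by name: the statement is the Claim_ definition above) =====
theorem convert_hanta_to_hangul_spec : Claim_equal_convert_hanta_to_hangul := by
  intro s _
  unfold Spec_convert_hanta_to_hangul convert_hanta_to_hangul convert_hanta_to_hangul_alt
  rw [pvB_loop_eq_run, pvRun_eq_norm _ PvBuf.empty trivial]
  rfl
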